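-- pv_equiv track=rewrite | github.com/akathorn/codejam | 2010/Qualification Round/park/park.py | solve
-- ===== SOURCE A (Python) =====
-- from collections import deque
-- from typing import Any, Callable, List, TypeVar, Union
--
-- def solve(rides: int, capacity: int, groups: List[int]) -> int:
--     queue = deque(groups)
--
--     moneys = 0
--     riders: List[int] = []
--     for _ in range(rides):
--         nriders = 0
--         riders.clear()
--         while len(queue) > 0 and (nriders + queue[0] <= capacity):
--             group = queue.popleft()
--             riders.append(group)
--             nriders += group
--         moneys += sum(riders)
--         queue.extend(riders)
--
--     return moneys
-- ===== SOURCE B (Python) =====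
-- def solve(rides, capacity, groups):
--     n = len(groups)
--     if rides <= 0 or n == 0:
--         return 0
--     visited = [-1] * n          # start position -> ride index at first visit
--     pref = []                   # pref[j] = money before ride j
--     s = 0
--     money = 0
--     t = 0
--     while t < rides and visited[s] < 0:
--         visited[s] = t
--         pref.append(money)
--         total = 0
--         j = s
--         k = 0
--         while k < n:
--             g = groups[j]
--             if total + g > capacity:
--                 break
--             total += g
--             j += 1
--             if j == n:
--                 j = 0
--             k += 1
--         money += total
--         s = j
--         t += 1
--     if t < rides:
--         i = visited[s]
--         c = t - i
--         q, r = divmod(rides - t, c)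
--         money += q * (money - pref[i]) + (pref[i + r] - pref[i])
--     return money
-- ===== Notes on version B (the rewrite author's own statement) =====
-- stated objective: alternative
-- what changed: A simulates every ride by popping/re-extending a deque; B observes the queue is always a rotation of the original list, walks start positions recording money prefixes in a visited array, detects the first repeated start position and accounts for all remaining full cycles and the leftover remainder arithmetically from the recorded prefixes, instead of simulating them.
import Mathlib
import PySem

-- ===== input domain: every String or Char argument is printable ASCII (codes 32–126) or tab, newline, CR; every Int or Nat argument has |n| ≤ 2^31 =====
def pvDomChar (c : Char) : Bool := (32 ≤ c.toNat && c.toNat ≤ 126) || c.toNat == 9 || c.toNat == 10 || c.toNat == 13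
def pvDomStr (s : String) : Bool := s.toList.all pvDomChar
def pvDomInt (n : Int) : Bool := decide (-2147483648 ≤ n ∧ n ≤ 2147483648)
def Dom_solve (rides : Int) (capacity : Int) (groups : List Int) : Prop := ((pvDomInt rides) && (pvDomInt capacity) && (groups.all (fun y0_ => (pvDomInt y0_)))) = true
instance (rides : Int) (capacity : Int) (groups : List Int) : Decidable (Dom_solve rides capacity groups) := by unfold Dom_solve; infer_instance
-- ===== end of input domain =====

-- B replaces A's per-ride deque simulation by a walk over start positions of the (rotated)
-- queue with cycle detection, accounting for repeated cycles arithmetically (alternative algorithm).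

-- ===== PORT A =====
-- inner 'while' of A: pop groups off the queue front while they still fit
def popLoop (capacity : Int) : List Int → Int → List Int → List Int × List Int
  | [], _, riders => ([], riders)
  | g :: rest, nriders, riders =>
      if nriders + g ≤ capacity then popLoop capacity rest (nriders + g) (riders ++ [g])
      else (g :: rest, riders)

def solve (rides : Int) (capacity : Int) (groups : List Int) : Int :=
  ((PySem.List.pyRange 0 rides 1).foldl
    (fun (st : List Int × Int) _ =>
      let p := popLoop capacity st.1 0 []
      (p.1 ++ p.2, st.2 + p.2.sum))
    (groups, 0)).2

-- ===== PORT B =====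
-- the inner boarding scan of B ('while k < n: ...'); fuel = n - k
def scanLoop (groups : List Int) (capacity : Int) : Nat → Int → Int → Int × Int
  | 0, j, total => (total, j)
  | fuel+1, j, total =>
      let g := PySem.List.pyGetD groups j 0
      if capacity < total + g then (total, j)
      else
        let j2 := j + 1
        scanLoop groups capacity fuel (if j2 == (groups.length : Int) then 0 else j2) (total + g)

-- the 'while t < rides and visited[s] < 0' loop of B; fuel = (rides - t).toNat
def cycleLoop (groups : List Int) (capacity : Int) :
    Nat → List Int → List Int → Int → Int → Int → List Int × List Int × Int × Int × Int
  | 0, visited, pref, s, money, t => (visited, pref, s, money, t)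
  | fuel+1, visited, pref, s, money, t =>
      if PySem.List.pyGetD visited s 0 < 0 then
        let p := scanLoop groups capacity groups.length s 0
        cycleLoop groups capacity fuel (PySem.List.pySetD visited s t) (pref ++ [money])
          p.2 (money + p.1) (t + 1)
      else (visited, pref, s, money, t)

-- what B does after the first loop: skip whole cycles, then add the remainder from pref
def postB (rides : Int) (capacity : Int) (groups : List Int)
    (visited pref : List Int) (s money t : Int) : Int :=
  if t < rides then
    let i := PySem.List.pyGetD visited s 0
    match PySem.Int.divmod? (rides - t) (t - i) with
    | none => 0   -- unreachable: t - i > 0 since i < t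
    | some qr =>
        money + qr.1 * (money - PySem.List.pyGetD pref i 0)
          + (PySem.List.pyGetD pref (i + qr.2) 0 - PySem.List.pyGetD pref i 0)
  else money

def solve_alt (rides : Int) (capacity : Int) (groups : List Int) : Int :=
  if rides ≤ 0 ∨ groups.length = 0 then 0
  else
    match cycleLoop groups capacity rides.toNat
        (PySem.List.pyRepeat [(-1 : Int)] (groups.length : Int)) [] 0 0 0 with
    | (visited, pref, s, money, t) => postB rides capacity groups visited pref s money t

-- ===== PRECONDITION & SPEC =====
def Spec_solve (rides : Int) (capacity : Int) (groups : List Int) (out : Int) : Prop := out = solve_alt rides capacity groups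
instance (rides : Int) (capacity : Int) (groups : List Int) (out : Int) : Decidable (Spec_solve rides capacity groups out) := by unfold Spec_solve; infer_instance

-- ===== CLAIM (what is proved, stated in full; the proofs are below) =====
def Claim_equal_solve : Prop := ∀ (rides : Int) (capacity : Int) (groups : List Int), Dom_solve rides capacity groups → Spec_solve rides capacity groups (solve rides capacity groups)

-- ===== LEMMAS AND PROOFS =====

-- boarding spec on a queue: (number of groups boarded, final total on board)
def bd (c : Int) : List Int → Int → Nat × Int
  | [], total => (0, total)
  | g :: rest, total =>
      if total + g ≤ c then ((bd c rest (total + g)).1 + 1, (bd c rest (total + g)).2)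
      else (0, total)

-- model: next start position, money per ride, money of t rides from start s
def nxtS (G : List Int) (c : Int) (s : Nat) : Nat := (s + (bd c (G.rotate s) 0).1) % G.length
def earnS (G : List Int) (c : Int) (s : Nat) : Int := (bd c (G.rotate s) 0).2
def SS (G : List Int) (c : Int) : Nat → Nat → Int
  | 0, _ => 0
  | t+1, s => earnS G c s + SS G c t (nxtS G c s)

def stepA (c : Int) (st : List Int × Int) : List Int × Int :=
  let p := popLoop c st.1 0 []
  (p.1 ++ p.2, st.2 + p.2.sum)

theorem bd_le (c : Int) : ∀ (q : List Int) (total : Int), (bd c q total).1 ≤ q.length := by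
  intro q
  induction q with
  | nil => intro total; simp [bd]
  | cons g rest ih =>
      intro total
      simp only [bd, List.length_cons]
      split_ifs with h
      · simpa using ih (total + g)
      · simp

theorem popLoop_eq (c : Int) : ∀ (q : List Int) (total : Int) (riders : List Int),
    popLoop c q total riders = (q.drop (bd c q total).1, riders ++ q.take (bd c q total).1) := by
  intro q
  induction q with
  | nil => intro total riders; simp [popLoop, bd]
  | cons g rest ih =>
      intro total riders
      simp only [popLoop, bd]
      split_ifs with h
      · rw [ih]; simp
      · simp

theorem bd_sum (c : Int) : ∀ (q : List Int) (total : Int),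
    (q.take (bd c q total).1).sum = (bd c q total).2 - total := by
  intro q
  induction q with
  | nil => intro total; simp [bd]
  | cons g rest ih =>
      intro total
      simp only [bd]
      split_ifs with h
      · simp only [List.take_succ_cons, List.sum_cons, ih (total + g)]
        ring
      · simp

theorem foldl_const {α β : Type} (g : α → α) :
    ∀ (l : List β) (init : α), l.foldl (fun st _ => g st) init = g^[l.length] init := by
  intro l
  induction l with
  | nil => intro init; simp
  | cons x xs ih =>
      intro init
      simp [List.foldl_cons, ih (g init), Function.iterate_succ_apply]

theorem nxt_lt (G : List Int) (c : Int) (s : Nat) (hn : 0 < G.length) : nxtS G c s < G.length :=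
  Nat.mod_lt _ hn

theorem iter_lt (G : List Int) (c : Int) (hn : 0 < G.length) :
    ∀ (t s : Nat), s < G.length → (nxtS G c)^[t] s < G.length := by
  intro t
  induction t with
  | zero => intro s hs; simpa using hs
  | succ t ih =>
      intro s hs
      rw [Function.iterate_succ_apply]
      exact ih _ (nxt_lt G c s hn)

theorem SS_add (G : List Int) (c : Int) : ∀ (a b s : Nat),
    SS G c (a + b) s = SS G c a s + SS G c b ((nxtS G c)^[a] s) := by
  intro a
  induction a with
  | zero => intro b s; simp [SS]
  | succ a ih =>
      intro b s
      rw [show a + 1 + b = (a + b) + 1 from by omega]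
      show earnS G c s + SS G c (a + b) (nxtS G c s)
          = SS G c (a + 1) s + SS G c b ((nxtS G c)^[a + 1] s)
      rw [ih b (nxtS G c s), Function.iterate_succ_apply]
      show _ = earnS G c s + SS G c a (nxtS G c s) + _
      ring

theorem SS_cycle (G : List Int) (c : Int) (cn s : Nat) (hc : (nxtS G c)^[cn] s = s) :
    ∀ q : Nat, (nxtS G c)^[q * cn] s = s ∧ SS G c (q * cn) s = (q : Int) * SS G c cn s := by
  intro q
  induction q with
  | zero => simp [SS]
  | succ q ih =>
      have hmul : (q + 1) * cn = q * cn + cn := by ring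
      refine ⟨?_, ?_⟩
      · rw [hmul, Function.iterate_add_apply, hc, ih.1]
      · rw [hmul, SS_add, ih.1, ih.2]
        push_cast
        ring

theorem stepA_rotate (G : List Int) (c : Int) (s : Nat) (M : Int) (hs : s < G.length) :
    stepA c (G.rotate s, M) = (G.rotate (nxtS G c s), M + earnS G c s) := by
  have hk : (bd c (G.rotate s) 0).1 ≤ (G.rotate s).length := bd_le c _ 0
  have h1 : (G.rotate s).drop (bd c (G.rotate s) 0).1 ++ (G.rotate s).take (bd c (G.rotate s) 0).1
      = G.rotate (nxtS G c s) := by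
    rw [← List.rotate_eq_drop_append_take hk, List.rotate_rotate, nxtS, List.rotate_mod]
  have h2 := bd_sum c (G.rotate s) 0
  simp only [stepA, popLoop_eq, List.nil_append]
  rw [h1, h2]
  simp [earnS]

theorem A_iter (G : List Int) (c : Int) (hn : 0 < G.length) :
    ∀ (T s : Nat) (M : Int), s < G.length →
      ((stepA c)^[T] (G.rotate s, M)).2 = M + SS G c T s := by
  intro T
  induction T with
  | zero => intro s M hs; simp [SS]
  | succ T ih =>
      intro s M hs
      rw [Function.iterate_succ_apply, stepA_rotate G c s M hs,
        ih (nxtS G c s) _ (nxt_lt G c s hn)]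
      show _ = M + (earnS G c s + SS G c T (nxtS G c s))
      ring

theorem solve_eq_iter (rides c : Int) (G : List Int) :
    solve rides c G = ((stepA c)^[rides.toNat] (G, 0)).2 := by
  unfold solve
  rw [show (fun (st : List Int × Int) (_ : Int) =>
        let p := popLoop c st.1 0 []
        (p.1 ++ p.2, st.2 + p.2.sum)) = (fun st _ => stepA c st) from rfl]
  rw [foldl_const (stepA c)]
  congr 1
  rw [PySem.List.length_pyRange_one]
  simp

theorem solve_eq_SS (rides c : Int) (G : List Int) (hn : 0 < G.length) :
    solve rides c G = SS G c rides.toNat 0 := by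
  rw [solve_eq_iter]
  have := A_iter G c hn rides.toNat 0 0 hn
  simpa [List.rotate_zero] using this

theorem solve_nil (rides c : Int) : solve rides c [] = 0 := by
  rw [solve_eq_iter]
  have hfix : stepA c (([] : List Int), (0 : Int)) = (([] : List Int), (0 : Int)) := by
    simp [stepA, popLoop]
  rw [Function.iterate_fixed hfix]

theorem scanLoop_eq (G : List Int) (c : Int) (s : Nat) (hs : s < G.length) :
    ∀ (fuel k : Nat) (total : Int), fuel + k = G.length →
      scanLoop G c fuel (((s + k) % G.length : Nat) : Int) total
        = ((bd c ((G.rotate s).drop k) total).2,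
           (((s + k + (bd c ((G.rotate s).drop k) total).1) % G.length : Nat) : Int)) := by
  intro fuel
  induction fuel with
  | zero =>
      intro k total hk
      have hk' : k = G.length := by omega
      subst hk'
      have hnil : (G.rotate s).drop G.length = [] := by
        apply List.drop_eq_nil_of_le
        simp [List.length_rotate]
      rw [hnil]
      simp [scanLoop, bd]
  | succ fuel ih =>
      intro k total hk
      have hklt : k < G.length := by omega
      have hkrot : k < (G.rotate s).length := by simpa [List.length_rotate] using hklt
      have hmodlt : (s + k) % G.length < G.length := Nat.mod_lt _ (by omega)
      have hget : PySem.List.pyGetD G (((s + k) % G.length : Nat) : Int) 0 = (G.rotate s)[k] := by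
        have h1 : G[(s + k) % G.length]'hmodlt = (G.rotate s)[k] := by
          rw [List.getElem_rotate]
          congr 1
          rw [Nat.add_comm]
        rw [← h1, show PySem.List.pyGetD G (((s + k) % G.length : Nat) : Int) 0
            = (PySem.List.pyGet? G (((s + k) % G.length : Nat) : Int)).getD 0 from rfl,
          PySem.List.pyGet?_natCast, List.getElem?_eq_getElem hmodlt, Option.getD_some]
      have hdrop : (G.rotate s).drop k = (G.rotate s)[k] :: (G.rotate s).drop (k + 1) :=
        List.drop_eq_getElem_cons hkrot
      have hcast1 : (((s + k) % G.length : Nat) : Int) + 1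
          = (((s + k) % G.length + 1 : Nat) : Int) := by push_cast; ring
      have hmod : (s + k + 1) % G.length = ((s + k) % G.length + 1) % G.length := by
        conv_rhs => rw [Nat.mod_add_mod]
      have hstep : (if ((((s + k) % G.length : Nat) : Int) + 1) == (G.length : Int) then 0
            else (((s + k) % G.length : Nat) : Int) + 1)
          = (((s + k + 1) % G.length : Nat) : Int) := by
        rw [hcast1]
        by_cases hwrap : (s + k) % G.length + 1 = G.length
        · rw [if_pos (beq_iff_eq.mpr (by exact_mod_cast hwrap)), hmod, hwrap, Nat.mod_self]
          rfl
        · rw [if_neg (by simp only [beq_iff_eq]; exact_mod_cast hwrap), hmod,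
            Nat.mod_eq_of_lt (show (s + k) % G.length + 1 < G.length from by omega)]
      simp only [scanLoop, hget]
      by_cases h : c < total + (G.rotate s)[k]
      · -- the next group does not fit: stop
        rw [if_pos h, hdrop]
        simp only [bd]
        rw [if_neg (by omega)]
        simp
      · -- board the group at position (s + k) % n and advance j with manual wrap-around
        have e : s + (k + 1) = s + k + 1 := rfl
        have ih' := ih (k + 1) (total + (G.rotate s)[k]) (by omega)
        rw [e] at ih'
        rw [if_neg h, hstep, ih', hdrop]
        simp only [bd]
        rw [if_pos (by omega)]
        refine Prod.ext rfl ?_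
        show (((s + (k + 1) + (bd c ((G.rotate s).drop (k + 1)) (total + (G.rotate s)[k])).1)
              % G.length : Nat) : Int)
          = (((s + k + ((bd c ((G.rotate s).drop (k + 1)) (total + (G.rotate s)[k])).1 + 1))
              % G.length : Nat) : Int)
        congr 2
        omega

theorem scan_eq (G : List Int) (c : Int) (s : Nat) (hs : s < G.length) :
    scanLoop G c G.length (s : Int) 0 = (earnS G c s, ((nxtS G c s : Nat) : Int)) := by
  have h0 : ((s : Nat) : Int) = (((s + 0) % G.length : Nat) : Int) := by
    rw [Nat.add_zero, Nat.mod_eq_of_lt hs]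
  rw [h0, scanLoop_eq G c s hs G.length 0 0 (by omega)]
  simp only [List.drop_zero, Nat.add_zero]
  rfl


def postB' (rides c : Int) (G : List Int)
    (r : List Int × List Int × Int × Int × Int) : Int :=
  postB rides c G r.1 r.2.1 r.2.2.1 r.2.2.2.1 r.2.2.2.2

-- the visited array the first loop has built after t rides: start position ↦ ride index
def visitedD (G : List Int) (c : Int) : Nat → List Int
  | 0 => PySem.List.pyRepeat [(-1 : Int)] (G.length : Int)
  | t+1 => PySem.List.pySetD (visitedD G c t) (((nxtS G c)^[t] 0 : Nat) : Int) (t : Int)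

theorem visitedD_length (G : List Int) (c : Int) (hn : 0 < G.length) :
    ∀ t : Nat, (visitedD G c t).length = G.length := by
  intro t
  induction t with
  | zero => simp [visitedD, PySem.List.pyRepeat_singleton]
  | succ t ih => simp [visitedD, PySem.List.length_pySetD, ih]

theorem visitedD_get (G : List Int) (c : Int) (hn : 0 < G.length) :
    ∀ (t p : Nat), p < G.length →
      0 ≤ PySem.List.pyGetD (visitedD G c t) (p : Int) 0 →
      ∃ j < t, (nxtS G c)^[j] 0 = p ∧ PySem.List.pyGetD (visitedD G c t) (p : Int) 0 = (j : Int) := by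
  intro t
  induction t with
  | zero =>
      intro p hp hge
      exfalso
      rw [show visitedD G c 0 = List.replicate G.length (-1) from by
          simp [visitedD, PySem.List.pyRepeat_singleton],
        show PySem.List.pyGetD (List.replicate G.length (-1 : Int)) (p : Int) 0
            = (PySem.List.pyGet? (List.replicate G.length (-1 : Int)) (p : Int)).getD 0 from rfl,
        PySem.List.pyGet?_natCast, List.getElem?_replicate] at hge
      simp only [if_pos hp, Option.getD_some] at hge
      omega
  | succ t ih =>
      intro p hp hge
      have hσ : (nxtS G c)^[t] 0 < (visitedD G c t).length := by
        rw [visitedD_length G c hn]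
        exact iter_lt G c hn t 0 hn
      have hset : PySem.List.pyGetD (visitedD G c (t + 1)) (p : Int) 0
          = if p = (nxtS G c)^[t] 0 then (t : Int)
            else PySem.List.pyGetD (visitedD G c t) (p : Int) 0 := by
        rw [show visitedD G c (t + 1)
            = PySem.List.pySetD (visitedD G c t) (((nxtS G c)^[t] 0 : Nat) : Int) (t : Int) from rfl]
        exact PySem.List.pyGetD_pySetD_natCast _ _ _ _ _ hσ
      rw [hset] at hge ⊢
      split_ifs at hge ⊢ with hcase
      · exact ⟨t, by omega, hcase.symm, rfl⟩
      · obtain ⟨j, hj, hjp, hjv⟩ := ih p hp hge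
        exact ⟨j, by omega, hjp, hjv⟩

theorem B3 (rides c : Int) (G : List Int) (hr : 0 < rides) (hn : 0 < G.length) :
    ∀ (fuel t : Nat), t + fuel = rides.toNat →
      postB' rides c G
        (cycleLoop G c fuel (visitedD G c t)
          ((List.range t).map (fun j => SS G c j 0))
          (((nxtS G c)^[t] 0 : Nat) : Int) (SS G c t 0) (t : Int))
      = SS G c rides.toNat 0 := by
  have hrT : rides = ((rides.toNat : Nat) : Int) := (Int.toNat_of_nonneg (by omega)).symm
  intro fuel
  induction fuel with
  | zero =>
      intro t ht
      have htn : t = rides.toNat := by omega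
      subst htn
      simp only [cycleLoop, postB', postB]
      rw [if_neg (by rw [hrT]; omega)]
  | succ fuel ih =>
      intro t ht
      have hσ : (nxtS G c)^[t] 0 < G.length := iter_lt G c hn t 0 hn
      by_cases hmem : PySem.List.pyGetD (visitedD G c t) (((nxtS G c)^[t] 0 : Nat) : Int) 0 < 0
      · -- this start position is new: take one more ride
        simp only [cycleLoop, if_pos hmem]
        rw [scan_eq G c _ hσ]
        have hvis : PySem.List.pySetD (visitedD G c t) (((nxtS G c)^[t] 0 : Nat) : Int) (t : Int)
            = visitedD G c (t + 1) := rfl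
        have hpref : (List.range t).map (fun j => SS G c j 0) ++ [SS G c t 0]
            = (List.range (t + 1)).map (fun j => SS G c j 0) := by
          rw [List.range_succ, List.map_append]
          rfl
        have hmoney : SS G c t 0 + earnS G c ((nxtS G c)^[t] 0) = SS G c (t + 1) 0 := by
          rw [SS_add G c t 1 0]
          simp [SS]
        have hnext : nxtS G c ((nxtS G c)^[t] 0) = (nxtS G c)^[t + 1] 0 :=
          (Function.iterate_succ_apply' _ _ _).symm
        have htc : ((t : Int) + 1) = ((t + 1 : Nat) : Int) := by push_cast; ring
        rw [hvis, hpref, hmoney, hnext, htc]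
        exact ih (t + 1) (by omega)
      · -- cycle detected: this start position was visited before, at ride i0
        simp only [cycleLoop, if_neg hmem, postB']
        have htlt : (t : Int) < rides := by omega
        obtain ⟨i0, hi0t, hval, hi0⟩ :=
          visitedD_get G c hn t ((nxtS G c)^[t] 0) hσ (by omega)
        have hcn0 : 0 < t - i0 := by omega
        have hcyc : (nxtS G c)^[t - i0] ((nxtS G c)^[t] 0) = (nxtS G c)^[t] 0 := by
          conv_lhs => rw [← hval]
          rw [← Function.iterate_add_apply, show t - i0 + i0 = t from by omega]
        unfold postB
        rw [if_pos htlt]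
        simp only [hi0]
        have hci : (t : Int) - ((i0 : Nat) : Int) = ((t - i0 : Nat) : Int) := by push_cast; omega
        have hrt : rides - (t : Int) = (((rides.toNat - t) : Nat) : Int) := by omega
        rw [hci, hrt]
        have hdm : PySem.Int.divmod? (((rides.toNat - t : Nat)) : Int) (((t - i0 : Nat)) : Int)
            = some ((((rides.toNat - t) / (t - i0) : Nat) : Int),
                    (((rides.toNat - t) % (t - i0) : Nat) : Int)) := by
          have hne : (((t - i0 : Nat)) : Int) ≠ 0 := by omega
          unfold PySem.Int.divmod?
          rw [if_neg hne]
          exact congrArg some (Prod.ext (PySem.Int.floordiv_natCast _ _) (PySem.Int.mod_natCast _ _))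
        rw [hdm]
        have hpget : ∀ (m : Nat), m < t →
            PySem.List.pyGetD ((List.range t).map (fun j => SS G c j 0)) ((m : Nat) : Int) 0
              = SS G c m 0 := by
          intro m hm
          rw [show PySem.List.pyGetD ((List.range t).map (fun j => SS G c j 0)) ((m : Nat) : Int) 0
              = (PySem.List.pyGet? ((List.range t).map (fun j => SS G c j 0)) ((m : Nat) : Int)).getD 0 from rfl,
            PySem.List.pyGet?_natCast,
            List.getElem?_eq_getElem (by simpa using hm)]
          simp
        have hrnlt : (rides.toNat - t) % (t - i0) < t - i0 := Nat.mod_lt _ hcn0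
        have hsum : ((i0 : Nat) : Int) + (((rides.toNat - t) % (t - i0) : Nat) : Int)
            = ((i0 + (rides.toNat - t) % (t - i0) : Nat) : Int) := by push_cast; ring
        simp only []
        rw [hsum, hpget i0 hi0t, hpget (i0 + (rides.toNat - t) % (t - i0)) (by omega)]
        set cn := t - i0 with hcndef
        set A := rides.toNat - t with hAdef
        set qn := A / cn with hqndef
        set rn := A % cn with hrndef
        have h4 := SS_cycle G c cn ((nxtS G c)^[t] 0) hcyc qn
        have hsplit : SS G c t 0 - SS G c i0 0 = SS G c cn ((nxtS G c)^[t] 0) := by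
          have h := SS_add G c i0 cn 0
          rw [show i0 + cn = t from by omega, hval] at h
          omega
        have hrem : SS G c (i0 + rn) 0 - SS G c i0 0 = SS G c rn ((nxtS G c)^[t] 0) := by
          have h := SS_add G c i0 rn 0
          rw [hval] at h
          omega
        have hTt : A = qn * cn + rn := by
          rw [hqndef, hrndef, Nat.mul_comm]
          exact (Nat.div_add_mod _ _).symm
        have h5 := SS_add G c t A 0
        rw [show t + A = rides.toNat from by omega] at h5
        rw [h5, hTt, SS_add G c (qn * cn) rn ((nxtS G c)^[t] 0), h4.1, h4.2,
          show SS G c t 0 - SS G c i0 0 = SS G c cn ((nxtS G c)^[t] 0) from hsplit,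
          show SS G c (i0 + rn) 0 - SS G c i0 0 = SS G c rn ((nxtS G c)^[t] 0) from hrem]
        ring


theorem solve_alt_eq_SS (rides c : Int) (G : List Int) (hr : 0 < rides) (hn : 0 < G.length) :
    solve_alt rides c G = SS G c rides.toNat 0 := by
  unfold solve_alt
  rw [if_neg (by push_neg; exact ⟨by omega, by omega⟩)]
  have h0 := B3 rides c G hr hn rides.toNat 0 (by omega)
  simpa [postB', SS, visitedD] using h0

-- ===== VERDICT (by name: the statement is the Claim_ definition above) =====
theorem solve_spec : Claim_equal_solve := by
  unfold Claim_equal_solve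
  intro rides c G _
  unfold Spec_solve
  by_cases hr : rides ≤ 0
  · have hA : solve rides c G = 0 := by
      rw [solve_eq_iter, show rides.toNat = 0 from by omega]
      rfl
    rw [hA]
    unfold solve_alt
    rw [if_pos (Or.inl hr)]
  · by_cases hn : G.length = 0
    · have hG : G = [] := List.eq_nil_of_length_eq_zero hn
      subst hG
      rw [solve_nil]
      unfold solve_alt
      rw [if_pos (show rides ≤ 0 ∨ ([] : List Int).length = 0 from Or.inr rfl)]
    · rw [solve_eq_SS rides c G (by omega),
        solve_alt_eq_SS rides c G (by omega) (by omega)]
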